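-- pv_equiv track=rewrite | github.com/1mikegrn/SWS_Challenge | SWS_Challenge/src/tools/interpolate_space.py | interpolate_space
-- ===== SOURCE A (Python) =====
-- def interpolate_space(ctr, bound, word_length, n_rows, n_cols, wrap):
--     '''interpolates space from center node to bounding node. returns the list of
--     index values which are between the center node and the bound node.'''
--     res = dict()
--     for idx in range(len(ctr)):
--         # if indexes are horizontal/vertical
--         if ctr[idx] == bound[idx]:
--             res[idx] = [ctr[idx] for x in range(word_length)]
--
--         # if indexes are diagonal
--         else:
--             if ctr[idx] < bound[idx]:
--                 res[idx] = [x for x in range(ctr[idx], bound[idx])]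
--             else:
--                 res[idx] = [x for x in range(ctr[idx], bound[idx], -1)]
--
--     # use modular math to wrap around the edge of the grid.
--     if wrap == True:
--         spots = [
--             (x%n_rows, y%n_cols)
--             for (x,y) in zip(res[0], res[1])
--         ]
--
--     # if wrap is false, then return None when interpolation extends over the
--     # edge of the grid.
--     else:
--         spots = [
--             (x, y) if (n_rows > x >= 0 and n_cols > y >= 0) else None
--             for (x, y) in zip(res[0], res[1])
--         ]
--
--     return spots
-- ===== SOURCE B (Python) =====
-- def interpolate_space(ctr, bound, word_length, n_rows, n_cols, wrap):
--     '''Single-pass rewrite: per-axis (start, step, length) parameters, then one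
--     loop over the common length computing each coordinate arithmetically.'''
--     def axis(c, b):
--         if c == b:
--             return c, 0, word_length
--         return c, (1 if c < b else -1), abs(b - c)
--     x0, dx, nx = axis(ctr[0], bound[0])
--     y0, dy, ny = axis(ctr[1], bound[1])
--     spots = []
--     for i in range(min(nx, ny)):
--         x = x0 + i * dx
--         y = y0 + i * dy
--         if wrap:
--             spots.append((x % n_rows, y % n_cols))
--         else:
--             spots.append((x, y) if 0 <= x < n_rows and 0 <= y < n_cols else None)
--     return spots
-- ===== Notes on version B (the rewrite author's own statement) =====
-- stated objective: simpler
-- what changed: Replaces the dict of per-axis materialised coordinate lists plus zip with per-axis (start, step, length) parameters and a single arithmetic pass over the common length.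
import Mathlib
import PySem

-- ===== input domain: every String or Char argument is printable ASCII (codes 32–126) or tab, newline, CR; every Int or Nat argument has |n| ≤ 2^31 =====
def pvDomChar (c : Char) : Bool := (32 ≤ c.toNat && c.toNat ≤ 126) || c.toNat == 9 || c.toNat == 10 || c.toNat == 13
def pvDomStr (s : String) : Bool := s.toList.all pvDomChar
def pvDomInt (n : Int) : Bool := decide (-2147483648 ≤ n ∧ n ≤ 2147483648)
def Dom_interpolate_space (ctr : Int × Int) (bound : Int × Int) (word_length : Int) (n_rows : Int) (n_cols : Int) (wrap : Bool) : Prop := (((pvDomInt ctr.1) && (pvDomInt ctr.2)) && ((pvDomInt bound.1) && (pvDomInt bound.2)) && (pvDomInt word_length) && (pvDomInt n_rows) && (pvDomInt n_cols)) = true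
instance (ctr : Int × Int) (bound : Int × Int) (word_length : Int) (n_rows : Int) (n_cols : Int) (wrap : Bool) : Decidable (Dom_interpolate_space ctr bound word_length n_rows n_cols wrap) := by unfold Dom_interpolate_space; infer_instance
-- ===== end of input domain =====

-- B replaces A's dict of materialised per-axis lists + zip with per-axis (start, step, length)
-- parameters and one arithmetic pass over the common length (objective: simpler).

-- ===== PORT A =====
-- body of A's per-axis loop iteration (the loop runs over idx in range(2); ctr is a pair)
def pvAxisListA (c b word_length : Int) : List Int :=
  if c = b then (PySem.List.pyRange 0 word_length 1).map (fun _ => c)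
  else if c < b then PySem.List.pyRange c b 1
  else PySem.List.pyRange c b (-1)

def interpolate_space (ctr : Int × Int) (bound : Int × Int) (word_length : Int) (n_rows : Int) (n_cols : Int) (wrap : Bool) : List (Option (Int × Int)) :=
  let res0 := pvAxisListA ctr.1 bound.1 word_length
  let res1 := pvAxisListA ctr.2 bound.2 word_length
  if wrap = true then
    (res0.zip res1).map (fun p => some (PySem.Int.mod p.1 n_rows, PySem.Int.mod p.2 n_cols))
  else
    (res0.zip res1).map (fun p =>
      if (n_rows > p.1 ∧ p.1 ≥ 0) ∧ (n_cols > p.2 ∧ p.2 ≥ 0) then some (p.1, p.2) else none)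

-- ===== PORT B =====
-- per-axis parameters: (start, step, length)
def pvAxisB (c b word_length : Int) : Int × Int × Int :=
  if c = b then (c, 0, word_length)
  else (c, if c < b then 1 else -1, |b - c|)

def interpolate_space_alt (ctr : Int × Int) (bound : Int × Int) (word_length : Int) (n_rows : Int) (n_cols : Int) (wrap : Bool) : List (Option (Int × Int)) :=
  let a0 := pvAxisB ctr.1 bound.1 word_length
  let a1 := pvAxisB ctr.2 bound.2 word_length
  (PySem.List.pyRange 0 (min a0.2.2 a1.2.2) 1).map (fun i =>
    let x := a0.1 + i * a0.2.1
    let y := a1.1 + i * a1.2.1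
    if wrap then some (PySem.Int.mod x n_rows, PySem.Int.mod y n_cols)
    else if 0 ≤ x ∧ x < n_rows ∧ 0 ≤ y ∧ y < n_cols then some (x, y) else none)

-- ===== PRECONDITION & SPEC =====
-- Pre_ excludes exactly the inputs where Python A raises ZeroDivisionError (wrap with a zero
-- n_rows or n_cols while the interpolated list is nonempty); B's Python raises there too.
def Pre_interpolate_space (ctr : Int × Int) (bound : Int × Int) (word_length : Int) (n_rows : Int) (n_cols : Int) (wrap : Bool) : Prop :=
  wrap = true → (n_rows ≠ 0 ∧ n_cols ≠ 0) ∨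
    min (if ctr.1 = bound.1 then word_length else |bound.1 - ctr.1|)
        (if ctr.2 = bound.2 then word_length else |bound.2 - ctr.2|) ≤ 0
instance (ctr : Int × Int) (bound : Int × Int) (word_length : Int) (n_rows : Int) (n_cols : Int) (wrap : Bool) : Decidable (Pre_interpolate_space ctr bound word_length n_rows n_cols wrap) := by unfold Pre_interpolate_space; infer_instance
def pvWitness_interpolate_space : (Int × Int) × (Int × Int) × Int × Int × Int × Bool := ((0, 0), (3, 0), 4, 5, 5, true)

def Spec_interpolate_space (ctr : Int × Int) (bound : Int × Int) (word_length : Int) (n_rows : Int) (n_cols : Int) (wrap : Bool) (out : List (Option (Int × Int))) : Prop := out = interpolate_space_alt ctr bound word_length n_rows n_cols wrap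
instance (ctr : Int × Int) (bound : Int × Int) (word_length : Int) (n_rows : Int) (n_cols : Int) (wrap : Bool) (out : List (Option (Int × Int))) : Decidable (Spec_interpolate_space ctr bound word_length n_rows n_cols wrap out) := by unfold Spec_interpolate_space; infer_instance

-- ===== CLAIM (what is proved, stated in full; the proofs are below) =====
def Claim_equal_interpolate_space : Prop := ∀ (ctr : Int × Int) (bound : Int × Int) (word_length : Int) (n_rows : Int) (n_cols : Int) (wrap : Bool), Dom_interpolate_space ctr bound word_length n_rows n_cols wrap → Pre_interpolate_space ctr bound word_length n_rows n_cols wrap → Spec_interpolate_space ctr bound word_length n_rows n_cols wrap (interpolate_space ctr bound word_length n_rows n_cols wrap)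

-- ===== LEMMAS AND PROOFS =====

-- A's per-axis list is the arithmetic progression given by B's parameters
theorem axisA_eq_map_range (c b wl : Int) :
    pvAxisListA c b wl =
      (List.range (pvAxisB c b wl).2.2.toNat).map
        (fun (k : Nat) => (pvAxisB c b wl).1 + (k : Int) * (pvAxisB c b wl).2.1) := by
  unfold pvAxisListA pvAxisB
  split_ifs with h1 h2
  · apply List.ext_getElem
    · simp [PySem.List.pyRange_one]
    · intro i _ _
      simp [PySem.List.pyRange_one]
  · rw [abs_of_pos (by omega : (0:Int) < b - c)]
    apply List.ext_getElem
    · simp [PySem.List.length_pyRange_one]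
    · intro i _ _
      simp [PySem.List.getElem_pyRange_one]
  · rw [abs_of_nonpos (by omega : b - c ≤ 0)]
    apply List.ext_getElem
    · simp [PySem.List.pyRange_neg_one]
    · intro i _ _
      simp [PySem.List.pyRange_neg_one]
      omega

theorem zip_map_range {a b : Type} (m k : Nat) (f : Nat -> a) (g : Nat -> b) :
    ((List.range m).map f).zip ((List.range k).map g) =
      (List.range (min m k)).map (fun i => (f i, g i)) := by
  apply List.ext_getElem
  · simp
  · intro i h1 h2
    simp [List.getElem_zip]

theorem pyRange_min_toNat (a b : Int) :
    PySem.List.pyRange 0 (min a b) 1 =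
      (List.range (min a.toNat b.toNat)).map (fun (k : Nat) => (k : Int)) := by
  apply List.ext_getElem
  · simp [PySem.List.length_pyRange_one]; omega
  · intro i _ _
    simp [PySem.List.getElem_pyRange_one]

-- ===== VERDICT (by name: the statement is the Claim_ definition above) =====
theorem interpolate_space_spec : Claim_equal_interpolate_space := by
  intro ctr bound wl nr nc wrap _ _
  unfold Spec_interpolate_space interpolate_space interpolate_space_alt
  simp only []
  rw [axisA_eq_map_range ctr.1 bound.1 wl, axisA_eq_map_range ctr.2 bound.2 wl,
    zip_map_range, pyRange_min_toNat]
  cases wrap with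
  | true =>
      rw [if_pos rfl]
      simp only [List.map_map]
      apply List.map_congr_left
      intro i _
      rfl
  | false =>
      rw [if_neg (by simp : ¬ (false = true))]
      simp only [List.map_map]
      apply List.map_congr_left
      intro i _
      simp only [Function.comp_apply]
      rw [if_neg (by simp : ¬ (false = true))]
      split_ifs with h1 h2 h2 <;> first | rfl | (exfalso; omega)
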